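-- pv_equiv track=rewrite | github.com/DajWaj/aplikacjeWebowe | 09_04_2024/zadanie.py | skresl
-- ===== SOURCE A (Python) =====
-- def skresl(word):
--     pelne_slowo = False
--     wakacje = "wakacje"
--     index = 0
--     ile = 0
--     for letter in word:
--         if letter == wakacje[index]:
--             index += 1
--         else:
--             ile += 1
--         if index >= len(wakacje):
--             pelne_slowo = True
--             index = 0
--
--     if pelne_slowo:
--         return ile + index
--     return len(word)
-- ===== SOURCE B (Python) =====
-- def eat(rest, pattern):
--     # match pattern greedily as a subsequence of rest; return the suffix
--     # after the match, or None if pattern cannot be completed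
--     for k, ch in enumerate(rest):
--         if ch == pattern[0]:
--             tail = rest[k + 1:]
--             return tail if len(pattern) == 1 else eat(tail, pattern[1:])
--     return None
--
--
-- def skresl(word):
--     completions = 0
--     rest = word
--     while True:
--         rest = eat(rest, "wakacje")
--         if rest is None:
--             return len(word) - 7 * completions
--         completions += 1
-- ===== Notes on version B (the rewrite author's own statement) =====
-- stated objective: alternative
-- what changed: B replaces A's single-pass state machine (pattern pointer + mismatch counter + flag) by repeatedly stripping one complete greedy 'wakacje' subsequence match off the front with a recursive helper over the pattern, then returns len(word) - 7*completions in closed form.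
import Mathlib
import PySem

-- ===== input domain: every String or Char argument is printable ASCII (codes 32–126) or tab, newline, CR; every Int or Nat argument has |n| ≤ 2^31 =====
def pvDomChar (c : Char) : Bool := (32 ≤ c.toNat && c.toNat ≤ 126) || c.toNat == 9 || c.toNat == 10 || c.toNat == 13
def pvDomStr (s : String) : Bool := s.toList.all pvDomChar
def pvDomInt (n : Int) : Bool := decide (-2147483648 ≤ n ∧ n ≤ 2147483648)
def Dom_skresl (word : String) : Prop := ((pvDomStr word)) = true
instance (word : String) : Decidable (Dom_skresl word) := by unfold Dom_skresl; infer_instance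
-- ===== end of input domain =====

-- B replaces A's single-pass state machine (pattern pointer + mismatch counter + flag)
-- by repeatedly stripping one complete greedy "wakacje" subsequence match off the front
-- with a recursive helper over the pattern; objective: alternative.


-- ===== PORT A =====
-- state: (pelne_slowo, index, ile); wakacje[index] ported as pyGet? (exact, index is never negative here)
def skreslStep (s : Bool × Int × Int) (letter : Char) : Bool × Int × Int :=
  let s1 : Bool × Int × Int :=
    if PySem.List.pyGet? "wakacje".toList s.2.1 = some letter then
      (s.1, s.2.1 + 1, s.2.2)
    else
      (s.1, s.2.1, s.2.2 + 1)
  if s1.2.1 ≥ 7 then (true, 0, s1.2.2) else s1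

def skresl (word : String) : Int :=
  let s := word.toList.foldl skreslStep (false, 0, 0)
  if s.1 then s.2.2 + s.2.1 else (word.toList.length : Int)

-- ===== PORT B =====
-- eat: the scan loop over rest becomes structural recursion on rest; the recursive
-- call on pattern[1:] stays a recursive call. Only ever called with a nonempty
-- pattern; the pat = [] arm is unreachable.
def eat (rest : List Char) (pat : List Char) : Option (List Char) :=
  match rest, pat with
  | _, [] => none          -- unreachable in B (pattern never empty)
  | [], _ => none
  | c :: cs, p :: ps =>
      if c = p then (if ps.isEmpty then some cs else eat cs ps)
      else eat cs (p :: ps)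

theorem eat_length : ∀ (rest pat r : List Char), eat rest pat = some r → r.length < rest.length := by
  intro rest
  induction rest with
  | nil => intro pat r h; cases pat <;> simp [eat] at h
  | cons c cs ih =>
    intro pat r h
    cases pat with
    | nil => simp [eat] at h
    | cons p ps =>
      simp only [eat] at h
      split_ifs at h with h1 h2
      · cases h; simp
      · have := ih ps r h; simp; omega
      · have := ih (p :: ps) r h; simp; omega

-- outer while-loop of B, recursion on the shrinking suffix
def loopB (len0 : Int) (rest : List Char) (completions : Int) : Int :=
  match h : eat rest "wakacje".toList with
  | none => len0 - 7 * completions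
  | some r => loopB len0 r (completions + 1)
termination_by rest.length
decreasing_by exact eat_length rest _ r h

def skresl_alt (word : String) : Int :=
  loopB (word.toList.length : Int) word.toList 0

-- ===== PRECONDITION & SPEC =====
def Spec_skresl (word : String) (out : Int) : Prop := out = skresl_alt word
instance (word : String) (out : Int) : Decidable (Spec_skresl word out) := by unfold Spec_skresl; infer_instance

-- ===== CLAIM (what is proved, stated in full; the proofs are below) =====
def Claim_equal_skresl : Prop := ∀ (word : String), Dom_skresl word → Spec_skresl word (skresl word)

-- ===== LEMMAS AND PROOFS =====

-- proof-only intermediate: greedy matcher state (pointer, completions)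
def gcStep (s : Int × Int) (letter : Char) : Int × Int :=
  if PySem.List.pyGet? "wakacje".toList s.1 = some letter then
    if s.1 + 1 = 7 then (0, s.2 + 1) else (s.1 + 1, s.2)
  else s

-- If the pointer is in [0,7), a successful lookup forces it below 7.
theorem pyGet_lt (i : Int) (a : Char)
    (h : PySem.List.pyGet? "wakacje".toList i = some a) (_hi : 0 ≤ i) : i < 7 := by
  by_contra hlt
  have : PySem.List.pyGet? "wakacje".toList i = none := by
    rw [PySem.List.pyGet?_eq_none_iff]
    simp [PySem.Raise.InRange]
    omega
  have hh : PySem.List.pyGet? "wakacje".toList i = some a := h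
  rw [this] at hh
  cases hh

-- Loop invariant: A's state is determined by the greedy matcher's state.
theorem loop_rel (l : List Char) : ∀ (i c ile : Int), 0 ≤ i → i < 7 → 0 ≤ c →
    l.foldl skreslStep (decide (0 < c), i, ile)
      = (decide (0 < (l.foldl gcStep (i, c)).2),
         (l.foldl gcStep (i, c)).1,
         ile + (l.length : Int) + 7 * c + i
           - 7 * (l.foldl gcStep (i, c)).2 - (l.foldl gcStep (i, c)).1) := by
  induction l with
  | nil => intro i c ile h0 h7 hc; simp; ring
  | cons a t ih =>
    intro i c ile h0 h7 hc
    by_cases h : PySem.List.pyGet? "wakacje".toList i = some a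
    · have hi7 : i < 7 := pyGet_lt i a h h0
      by_cases h7' : i + 1 = 7
      · have : decide (0 < c + 1) = true := by simp; omega
        simp only [List.foldl_cons, skreslStep, gcStep, h, if_pos, h7']
        simp only [ge_iff_le, le_refl, if_pos]
        rw [show ((true, (0:Int), ile) : Bool × Int × Int)
              = (decide (0 < c + 1), (0:Int), ile) from by rw [this]]
        rw [ih 0 (c+1) ile (by omega) (by omega) (by omega)]
        simp only [Prod.mk.injEq, List.length_cons]
        refine ⟨by trivial, by trivial, ?_⟩
        push_cast; omega
      · have hge : ¬ (i + 1 ≥ 7) := by omega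
        simp only [List.foldl_cons, skreslStep, gcStep, h, if_pos, if_neg h7', if_neg hge]
        rw [ih (i+1) c ile (by omega) (by omega) hc]
        simp only [Prod.mk.injEq, List.length_cons]
        refine ⟨by trivial, by trivial, ?_⟩
        push_cast; omega
    · have hge : ¬ (i ≥ 7) := by omega
      simp only [List.foldl_cons, skreslStep, gcStep, if_neg h, if_neg hge]
      rw [ih i c (ile+1) h0 h7 hc]
      simp only [Prod.mk.injEq, List.length_cons]
      refine ⟨by trivial, by trivial, ?_⟩
      push_cast; omega

theorem gc_nonneg (l : List Char) : ∀ (i c : Int), 0 ≤ c →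
    0 ≤ (l.foldl gcStep (i, c)).2 := by
  induction l with
  | nil => intro i c hc; simpa using hc
  | cons a t ih =>
    intro i c hc
    simp only [List.foldl_cons, gcStep]
    split_ifs
    · exact ih _ _ (by omega)
    · exact ih _ _ hc
    · exact ih _ _ hc

-- facts about the pattern suffix at offset i (0 ≤ i < 7)
theorem wak_get (i : Int) (h0 : 0 ≤ i) (h7 : i < 7) :
    PySem.List.pyGet? "wakacje".toList i = some (("wakacje".toList.drop i.toNat).headI) := by
  interval_cases i <;> decide

theorem wak_last (i : Int) (h0 : 0 ≤ i) (h7 : i < 7) :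
    (("wakacje".toList.drop i.toNat).tail.isEmpty = true) ↔ i + 1 = 7 := by
  interval_cases i <;> decide

theorem wak_cons (i : Int) (h0 : 0 ≤ i) (h7 : i < 7) :
    "wakacje".toList.drop i.toNat
      = ("wakacje".toList.drop i.toNat).headI :: "wakacje".toList.drop (i+1).toNat := by
  interval_cases i <;> decide

-- eat starting mid-pattern vs the greedy matcher's fold
theorem eat_gc (l : List Char) : ∀ (i : Int), 0 ≤ i → i < 7 → ∀ (c : Int),
    (eat l ("wakacje".toList.drop i.toNat) = none → (l.foldl gcStep (i, c)).2 = c) ∧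
    (∀ r, eat l ("wakacje".toList.drop i.toNat) = some r →
        (l.foldl gcStep (i, c)).2 = (r.foldl gcStep (0, c + 1)).2) := by
  induction l with
  | nil =>
    intro i h0 h7 c
    refine ⟨fun _ => rfl, fun r hr => ?_⟩
    rw [wak_cons i h0 h7] at hr
    simp [eat] at hr
  | cons a t ih =>
    intro i h0 h7 c
    have hget := wak_get i h0 h7
    have hcons := wak_cons i h0 h7
    set p := ("wakacje".toList.drop i.toNat).headI with hp
    have htail : ("wakacje".toList.drop i.toNat).tail = "wakacje".toList.drop (i+1).toNat := by
      rw [hcons]; rfl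
    by_cases ha : a = p
    · subst ha
      by_cases hlast : ("wakacje".toList.drop (i+1).toNat).isEmpty = true
      · have h17 : i + 1 = 7 := (wak_last i h0 h7).mp (htail ▸ hlast)
        have heat : eat (p :: t) ("wakacje".toList.drop i.toNat) = some t := by
          rw [hcons]; simp only [eat]; rw [if_pos trivial, if_pos hlast]
        refine ⟨fun hn => ?_, fun r hr => ?_⟩
        · rw [heat] at hn; cases hn
        · rw [heat] at hr
          cases hr
          simp only [List.foldl_cons, gcStep]
          rw [if_pos hget, if_pos h17]
      · have h17 : i + 1 ≠ 7 := fun h => hlast (htail ▸ (wak_last i h0 h7).mpr h)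
        have heat : eat (p :: t) ("wakacje".toList.drop i.toNat)
            = eat t ("wakacje".toList.drop (i+1).toNat) := by
          rw [hcons]; simp only [eat]; rw [if_pos trivial, if_neg hlast]
        have hfold : (p :: t).foldl gcStep (i, c) = t.foldl gcStep (i + 1, c) := by
          simp only [List.foldl_cons, gcStep]
          rw [if_pos hget, if_neg h17]
        rw [heat, hfold]
        exact ih (i+1) (by omega) (by omega) c
    · have heat : eat (a :: t) ("wakacje".toList.drop i.toNat)
          = eat t ("wakacje".toList.drop i.toNat) := by
        conv_lhs => rw [hcons]
        simp only [eat]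
        rw [if_neg ha, ← hcons]
      have hne : ¬ (PySem.List.pyGet? "wakacje".toList i = some a) := by
        rw [hget]; intro hx; exact ha (Option.some.inj hx).symm
      have hfold : (a :: t).foldl gcStep (i, c) = t.foldl gcStep (i, c) := by
        simp only [List.foldl_cons, gcStep]
        rw [if_neg hne]
      rw [heat, hfold]
      exact ih i h0 h7 c

-- loopB equals the closed form over the greedy matcher
theorem loopB_eq (n : Nat) : ∀ (l : List Char), l.length ≤ n → ∀ (L c : Int),
    loopB L l c = L - 7 * (l.foldl gcStep (0, c)).2 := by
  induction n with
  | zero =>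
    intro l hl L c
    have : l = [] := by cases l <;> simp at hl ⊢
    subst this
    rw [loopB]
    split
    · rfl
    · next r heq => simp [eat] at heq
  | succ n ih =>
    intro l hl L c
    have h0 : "wakacje".toList.drop ((0:Int)).toNat = "wakacje".toList := rfl
    have hgc := eat_gc l 0 (by omega) (by omega) c
    rw [h0] at hgc
    rw [loopB]
    split
    · next heq => rw [hgc.1 heq]
    · next r heq =>
        have hlen := eat_length l _ r heq
        rw [ih r (by omega) L (c+1), hgc.2 r heq]

-- ===== VERDICT (by name: the statement is the Claim_ definition above) =====
theorem skresl_spec : Claim_equal_skresl := by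
  intro word _
  unfold Spec_skresl skresl skresl_alt
  have h := loop_rel word.toList 0 0 0 (by omega) (by omega) (by omega)
  rw [show (decide (0 < (0:Int)) = false) from by decide] at h
  rw [h, loopB_eq word.toList.length word.toList le_rfl]
  set s := word.toList.foldl gcStep (0, 0) with hs
  have hc := gc_nonneg word.toList 0 0 (by omega)
  rw [← hs] at hc
  by_cases hp : 0 < s.2
  · simp only [hp, if_pos, decide_true]
    ring_nf
  · have : s.2 = 0 := by omega
    simp [this]
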